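-- pv_equiv track=rewrite | github.com/KHyeon9/Algorithm_Python | BOJ/Silver/17829.py | solution
-- ===== SOURCE A (Python) =====
-- def solution(arr, x, y):
--     dx = [0, 1, 0, 1]
--     dy = [0, 0, 1, 1]
--     nums = []
--
--     for idx in range(4):
--         mx = x + dx[idx]
--         my = y + dy[idx]
--         num = arr[mx][my]
--         nums.append(num)
--     nums.sort()
--     return nums[-2]
-- ===== SOURCE B (Python) =====
-- def solution(arr, x, y):
--     a = arr[x][y]
--     b = arr[x + 1][y]
--     c = arr[x][y + 1]
--     d = arr[x + 1][y + 1]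
--     hi, lo = (a, b) if a >= b else (b, a)
--     for v in (c, d):
--         if v > hi:
--             lo, hi = hi, v
--         elif v > lo:
--             lo = v
--     return lo
-- ===== Notes on version B (the rewrite author's own statement) =====
-- stated objective: simpler
-- what changed: B drops A's list-append-then-sort: it fetches the four cells in the same order and keeps the two largest seen so far in one pass, returning the running second maximum.
import Mathlib
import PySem

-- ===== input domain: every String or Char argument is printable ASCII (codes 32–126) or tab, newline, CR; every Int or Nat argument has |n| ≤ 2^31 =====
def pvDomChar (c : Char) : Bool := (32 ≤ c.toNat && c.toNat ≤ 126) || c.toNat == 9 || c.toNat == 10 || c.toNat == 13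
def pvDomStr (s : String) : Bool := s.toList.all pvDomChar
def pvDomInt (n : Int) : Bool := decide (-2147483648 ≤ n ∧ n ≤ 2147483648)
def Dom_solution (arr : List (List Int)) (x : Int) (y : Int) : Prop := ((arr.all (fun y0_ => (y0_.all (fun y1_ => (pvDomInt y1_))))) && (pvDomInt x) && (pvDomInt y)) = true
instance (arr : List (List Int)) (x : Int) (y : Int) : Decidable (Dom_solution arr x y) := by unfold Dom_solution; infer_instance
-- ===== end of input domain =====

-- B replaces A's append-then-sort of the four cells by a single pass keeping the two
-- largest values seen so far (objective: simpler, no auxiliary list and no sort).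

-- ===== PORT A =====
def solution (arr : List (List Int)) (x : Int) (y : Int) : Int :=
  let dx : List Int := [0, 1, 0, 1]
  let dy : List Int := [0, 0, 1, 1]
  let nums : List Int :=
    (PySem.List.pyRange 0 4 1).foldl (fun nums idx =>
      let mx := x + PySem.List.pyGetD dx idx 0
      let my := y + PySem.List.pyGetD dy idx 0
      let num := PySem.List.pyGetD (PySem.List.pyGetD arr mx []) my 0
      nums ++ [num]) []
  PySem.List.pyGetD (PySem.List.sorted nums (fun v => v) false) (-2) 0

-- ===== PORT B =====
def solution_alt (arr : List (List Int)) (x : Int) (y : Int) : Int :=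
  let a := PySem.List.pyGetD (PySem.List.pyGetD arr x []) y 0
  let b := PySem.List.pyGetD (PySem.List.pyGetD arr (x + 1) []) y 0
  let c := PySem.List.pyGetD (PySem.List.pyGetD arr x []) (y + 1) 0
  let d := PySem.List.pyGetD (PySem.List.pyGetD arr (x + 1) []) (y + 1) 0
  let p0 : Int × Int := if a ≥ b then (a, b) else (b, a)
  (([c, d].foldl (fun (p : Int × Int) v =>
      if v > p.1 then (v, p.1) else if v > p.2 then (p.1, v) else p) p0)).2

-- ===== PRECONDITION & SPEC =====
-- Pre_ excludes exactly the inputs on which Python A raises IndexError (a row or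
-- column index, after Python's negative-index rule, out of range).
def Pre_solution (arr : List (List Int)) (x : Int) (y : Int) : Prop :=
  PySem.Raise.InRange arr.length x ∧ PySem.Raise.InRange arr.length (x + 1) ∧
  PySem.Raise.InRange (PySem.List.pyGetD arr x []).length y ∧
  PySem.Raise.InRange (PySem.List.pyGetD arr x []).length (y + 1) ∧
  PySem.Raise.InRange (PySem.List.pyGetD arr (x + 1) []).length y ∧
  PySem.Raise.InRange (PySem.List.pyGetD arr (x + 1) []).length (y + 1)
instance (arr : List (List Int)) (x : Int) (y : Int) : Decidable (Pre_solution arr x y) := by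
  unfold Pre_solution; infer_instance
def pvWitness_solution : List (List Int) × Int × Int := ([[1, 2], [3, 4]], 0, 0)
def Spec_solution (arr : List (List Int)) (x : Int) (y : Int) (out : Int) : Prop := out = solution_alt arr x y
instance (arr : List (List Int)) (x : Int) (y : Int) (out : Int) : Decidable (Spec_solution arr x y out) := by unfold Spec_solution; infer_instance

-- ===== CLAIM (what is proved, stated in full; the proofs are below) =====
def Claim_equal_solution : Prop := ∀ (arr : List (List Int)) (x : Int) (y : Int), Dom_solution arr x y → Pre_solution arr x y → Spec_solution arr x y (solution arr x y)

-- ===== LEMMAS AND PROOFS =====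
theorem ib_cons {α : Type} (f : α → α → Bool) (x y : α) (ys : List α) :
    PySem.List.insertBy f x (y :: ys) = if f x y then x :: y :: ys else y :: PySem.List.insertBy f x ys := rfl
theorem ib_nil {α : Type} (f : α → α → Bool) (x : α) : PySem.List.insertBy f x [] = [x] := rfl
theorem g2 (p q r s : Int) : PySem.List.pyGetD [p, q, r, s] (-2) 0 = r := rfl

set_option maxHeartbeats 4000000 in
theorem sec4 (a b c d : Int) :
    PySem.List.pyGetD (PySem.List.sorted [a, b, c, d] (fun v => v) false) (-2) 0 =
    (([c, d].foldl (fun (p : Int × Int) v =>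
        if v > p.1 then (v, p.1) else if v > p.2 then (p.1, v) else p)
        (if a ≥ b then (a, b) else (b, a))).2) := by
  simp only [PySem.List.sorted, List.foldl]
  repeat' (simp only [ib_nil, ib_cons, g2]; split_ifs)
  all_goals simp_all only [g2, gt_iff_lt, ge_iff_le, decide_eq_true_eq]
  all_goals omega

theorem nums_eval (arr : List (List Int)) (x y : Int) :
    ((PySem.List.pyRange 0 4 1).foldl (fun nums idx =>
      let mx := x + PySem.List.pyGetD ([0, 1, 0, 1] : List Int) idx 0
      let my := y + PySem.List.pyGetD ([0, 0, 1, 1] : List Int) idx 0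
      let num := PySem.List.pyGetD (PySem.List.pyGetD arr mx []) my 0
      nums ++ [num]) ([] : List Int)) =
    [PySem.List.pyGetD (PySem.List.pyGetD arr x []) y 0,
     PySem.List.pyGetD (PySem.List.pyGetD arr (x + 1) []) y 0,
     PySem.List.pyGetD (PySem.List.pyGetD arr x []) (y + 1) 0,
     PySem.List.pyGetD (PySem.List.pyGetD arr (x + 1) []) (y + 1) 0] := by
  have h : PySem.List.pyRange 0 4 1 = [0, 1, 2, 3] := by decide
  have dx0 : PySem.List.pyGetD ([0, 1, 0, 1] : List Int) 0 0 = 0 := by decide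
  have dx1 : PySem.List.pyGetD ([0, 1, 0, 1] : List Int) 1 0 = 1 := by decide
  have dx2 : PySem.List.pyGetD ([0, 1, 0, 1] : List Int) 2 0 = 0 := by decide
  have dx3 : PySem.List.pyGetD ([0, 1, 0, 1] : List Int) 3 0 = 1 := by decide
  have dy0 : PySem.List.pyGetD ([0, 0, 1, 1] : List Int) 0 0 = 0 := by decide
  have dy1 : PySem.List.pyGetD ([0, 0, 1, 1] : List Int) 1 0 = 0 := by decide
  have dy2 : PySem.List.pyGetD ([0, 0, 1, 1] : List Int) 2 0 = 1 := by decide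
  have dy3 : PySem.List.pyGetD ([0, 0, 1, 1] : List Int) 3 0 = 1 := by decide
  rw [h]
  simp only [List.foldl, dx0, dx1, dx2, dx3, dy0, dy1, dy2, dy3, add_zero,
    List.nil_append, List.cons_append]

-- ===== VERDICT (by name: the statement is the Claim_ definition above) =====
theorem solution_spec : Claim_equal_solution := by
  intro arr x y _ _
  unfold Spec_solution
  show solution arr x y = solution_alt arr x y
  simp only [solution, solution_alt]
  rw [nums_eval]
  exact sec4 _ _ _ _
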